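-- pv_equiv track=rewrite | github.com/strath-ace/smart-dao | sem_analysis/dev/data-collection-sem/copernicus/old2/get_useful_data.py | divide_by_digits
-- ===== SOURCE A (Python) =====
-- def divide_by_digits(data, chari):
--     temp = []
--     output = []
--     for i in range(len(data)):
--         if data[i] in chari:
--             output.append("".join(temp).split())
--             temp = []
--         else:
--             temp.append(data[i])
--         if i == len(data)-1:
--             output.append("".join(temp).split())
--     return output
-- ===== SOURCE B (Python) =====
-- import re
--
--
-- def divide_by_digits(data, chari):
--     if not data:
--         return []
--     if not chari:
--         return [data.split()]
--     pattern = '[' + ''.join(re.escape(c) for c in chari) + ']'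
--     return [segment.split() for segment in re.split(pattern, data)]
-- ===== Notes on version B (the rewrite author's own statement) =====
-- stated objective: idiomatic
-- what changed: Replaces A's per-character accumulate/flush loop (with its in-loop last-index check) by a single regex split on a character class built from chari, followed by a whitespace-split of each segment; empty data and empty chari are handled by two upfront returns.
import Mathlib
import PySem

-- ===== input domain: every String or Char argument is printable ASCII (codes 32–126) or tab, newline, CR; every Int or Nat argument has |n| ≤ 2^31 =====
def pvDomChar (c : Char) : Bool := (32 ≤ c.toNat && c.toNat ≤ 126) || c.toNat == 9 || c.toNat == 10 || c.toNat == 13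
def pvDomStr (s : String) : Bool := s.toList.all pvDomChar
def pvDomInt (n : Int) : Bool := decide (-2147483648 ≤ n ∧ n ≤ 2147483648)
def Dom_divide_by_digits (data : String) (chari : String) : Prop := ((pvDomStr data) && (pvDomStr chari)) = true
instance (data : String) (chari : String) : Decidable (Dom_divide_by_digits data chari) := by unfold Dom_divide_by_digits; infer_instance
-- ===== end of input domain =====

-- B replaces A's per-character accumulate/flush loop by one library split at the delimiter
-- characters followed by a whitespace-split of each segment (objective: idiomatic).

-- ===== PORT A =====
-- A's loop over i in range(len(data)): state (temp, output); the 'i == len(data)-1' flush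
-- is the singleton case of the recursion (the last iteration).
def divideByDigitsLoop (chari : List Char) : List Char → List Char → List (List String) → List (List String)
  | [], _, out => out
  | [c], temp, out =>
      if chari.contains c then
        -- flush temp, then the i == len-1 flush of the now-empty temp
        out ++ [PySem.Str.split₀ (String.ofList temp), PySem.Str.split₀ (String.ofList [])]
      else
        out ++ [PySem.Str.split₀ (String.ofList (temp ++ [c]))]
  | c :: c' :: rest, temp, out =>
      if chari.contains c then
        divideByDigitsLoop chari (c' :: rest) [] (out ++ [PySem.Str.split₀ (String.ofList temp)])
      else
        divideByDigitsLoop chari (c' :: rest) (temp ++ [c]) out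

def divide_by_digits (data : String) (chari : String) : List (List String) :=
  divideByDigitsLoop chari.toList data.toList [] []

-- ===== PORT B =====
-- hand port of re.split('[...]', data) where the class holds exactly the chars of chari:
-- split data at every occurrence of a char of chari, keeping empty segments (exact there).
def reSplitClass (chari : List Char) : List Char → List (List Char)
  | [] => [[]]
  | c :: rest =>
      if chari.contains c then
        [] :: reSplitClass chari rest
      else
        match reSplitClass chari rest with
        | s :: ss => (c :: s) :: ss
        | [] => [[c]]   -- unreachable: reSplitClass never returns []

def divide_by_digits_alt (data : String) (chari : String) : List (List String) :=
  if data = "" then []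
  else if chari = "" then [PySem.Str.split₀ data]
  else (reSplitClass chari.toList data.toList).map (fun s => PySem.Str.split₀ (String.ofList s))

-- ===== PRECONDITION & SPEC =====
def Spec_divide_by_digits (data : String) (chari : String) (out : List (List String)) : Prop := out = divide_by_digits_alt data chari
instance (data : String) (chari : String) (out : List (List String)) : Decidable (Spec_divide_by_digits data chari out) := by unfold Spec_divide_by_digits; infer_instance

-- ===== CLAIM (what is proved, stated in full; the proofs are below) =====
def Claim_equal_divide_by_digits : Prop := ∀ (data : String) (chari : String), Dom_divide_by_digits data chari → Spec_divide_by_digits data chari (divide_by_digits data chari)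

-- ===== LEMMAS AND PROOFS =====

theorem reSplitClass_ne_nil (chari : List Char) (cs : List Char) : reSplitClass chari cs ≠ [] := by
  cases cs with
  | nil => simp [reSplitClass]
  | cons c rest =>
      simp only [reSplitClass]
      split
      · simp
      · cases h : reSplitClass chari rest <;> simp

-- prepend `temp` to the first segment
def mergeHead (temp : List Char) : List (List Char) → List (List Char)
  | [] => [temp]
  | s :: ss => (temp ++ s) :: ss

theorem loop_eq (chari : List Char) (cs : List Char) (temp : List Char) (out : List (List String))
    (h : cs ≠ []) :
    divideByDigitsLoop chari cs temp out =
      out ++ (mergeHead temp (reSplitClass chari cs)).map (fun s => PySem.Str.split₀ (String.ofList s)) := by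
  induction cs generalizing temp out with
  | nil => exact absurd rfl h
  | cons c rest ih =>
      cases rest with
      | nil =>
          simp only [divideByDigitsLoop, reSplitClass]
          split
          · simp [mergeHead]
          · simp [mergeHead]
      | cons c' rest' =>
          obtain ⟨s, ss, hx⟩ : ∃ s ss, reSplitClass chari (c' :: rest') = s :: ss := by
            cases h' : reSplitClass chari (c' :: rest') with
            | nil => exact absurd h' (reSplitClass_ne_nil _ _)
            | cons a b => exact ⟨a, b, rfl⟩
          have hstep : reSplitClass chari (c :: c' :: rest') =
              if chari.contains c then [] :: (s :: ss) else (c :: s) :: ss := by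
            rw [show reSplitClass chari (c :: c' :: rest') =
                  (if chari.contains c then [] :: reSplitClass chari (c' :: rest')
                   else match reSplitClass chari (c' :: rest') with
                        | s :: ss => (c :: s) :: ss
                        | [] => [[c]]) from rfl, hx]
          have hun : divideByDigitsLoop chari (c :: c' :: rest') temp out =
              if chari.contains c then
                divideByDigitsLoop chari (c' :: rest') []
                  (out ++ [PySem.Str.split₀ (String.ofList temp)])
              else
                divideByDigitsLoop chari (c' :: rest') (temp ++ [c]) out := rfl
          by_cases hcc : chari.contains c = true
          · rw [hun, if_pos hcc, ih _ _ (by simp), hstep, if_pos hcc]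
            simp [mergeHead, hx]
          · rw [hun, if_neg hcc, ih _ _ (by simp), hstep, if_neg hcc]
            simp [mergeHead, hx]

theorem mergeHead_nil_of_ne_nil (l : List (List Char)) (h : l ≠ []) : mergeHead [] l = l := by
  cases l with
  | nil => exact absurd rfl h
  | cons s ss => simp [mergeHead]

theorem reSplitClass_no_delims (cs : List Char) : reSplitClass [] cs = [cs] := by
  induction cs with
  | nil => rfl
  | cons c rest ih => simp [reSplitClass, ih]

-- ===== VERDICT (by name: the statement is the Claim_ definition above) =====
theorem divide_by_digits_spec : Claim_equal_divide_by_digits := by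
  intro data chari _
  unfold Spec_divide_by_digits divide_by_digits divide_by_digits_alt
  by_cases hd : data = ""
  · subst hd; simp [divideByDigitsLoop]
  · have hcs : data.toList ≠ [] := by
      intro h
      apply hd
      have h2 := congrArg String.ofList h
      rwa [String.ofList_toList] at h2
    rw [loop_eq chari.toList data.toList [] [] hcs,
        mergeHead_nil_of_ne_nil _ (reSplitClass_ne_nil _ _)]
    by_cases hc : chari = ""
    · subst hc
      simp [hd, reSplitClass_no_delims, PySem.Str.split₀]
    · simp [hd, hc]
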